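-- pv_equiv track=rewrite | github.com/RohitKulkarni02/Medication-Instruction-Simplifier | scripts/analyze_results.py | drug_category
-- ===== SOURCE A (Python) =====
-- SIMPLE_OTC_KEYS = sorted(
--     [
--         "IBUPROFEN",
--         "ACETAMINOPHEN",
--         "DIPHENHYDRAMINE",
--         "LORATADINE",
--         "OMEPRAZOLE",
--         "CETIRIZINE",
--         "ASPIRIN",
--         "NAPROXEN",
--     ],
--     key=len,
--     reverse=True,
-- )
--
-- COMMON_RX_KEYS = sorted(
--     [
--         "AMOXICILLIN",
--         "METFORMIN",
--         "LISINOPRIL",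
--         "ATORVASTATIN",
--         "METOPROLOL",
--         "SERTRALINE",
--         "PREDNISONE",
--         "AZITHROMYCIN",
--     ],
--     key=len,
--     reverse=True,
-- )
--
-- HIGH_RISK_KEYS = sorted(
--     [
--         "METHOTREXATE",
--         "TOFACITINIB",
--         "WARFARIN",
--         "ISOTRETINOIN",
--         "CLOZAPINE",
--         "OXYCODONE",
--         "ALPRAZOLAM",
--         "AMPHETAMINE",
--         "DIAZEPAM",
--     ],
--     key=len,
--     reverse=True,
-- )
--
-- def drug_category(drug_name: str) -> str:
--     """Map openFDA-style drug_name to one of three paper categories or Uncategorized."""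
--     n = (drug_name or "").strip().upper()
--     if not n:
--         return "Uncategorized"
--
--     def matches(keys: list[str]) -> bool:
--         for k in keys:
--             if n == k or n.startswith(k + " ") or n.startswith(k + ","):
--                 return True
--         return False
--
--     if matches(HIGH_RISK_KEYS):
--         return "High-Risk/Controlled"
--     if matches(COMMON_RX_KEYS):
--         return "Common Rx"
--     if matches(SIMPLE_OTC_KEYS):
--         return "Simple OTC"
--     return "Uncategorized"
-- ===== SOURCE B (Python) =====
-- DRUG_CATEGORY = {
--     "METHOTREXATE": "High-Risk/Controlled",
--     "TOFACITINIB": "High-Risk/Controlled",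
--     "WARFARIN": "High-Risk/Controlled",
--     "ISOTRETINOIN": "High-Risk/Controlled",
--     "CLOZAPINE": "High-Risk/Controlled",
--     "OXYCODONE": "High-Risk/Controlled",
--     "ALPRAZOLAM": "High-Risk/Controlled",
--     "AMPHETAMINE": "High-Risk/Controlled",
--     "DIAZEPAM": "High-Risk/Controlled",
--     "AMOXICILLIN": "Common Rx",
--     "METFORMIN": "Common Rx",
--     "LISINOPRIL": "Common Rx",
--     "ATORVASTATIN": "Common Rx",
--     "METOPROLOL": "Common Rx",
--     "SERTRALINE": "Common Rx",
--     "PREDNISONE": "Common Rx",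
--     "AZITHROMYCIN": "Common Rx",
--     "IBUPROFEN": "Simple OTC",
--     "ACETAMINOPHEN": "Simple OTC",
--     "DIPHENHYDRAMINE": "Simple OTC",
--     "LORATADINE": "Simple OTC",
--     "OMEPRAZOLE": "Simple OTC",
--     "CETIRIZINE": "Simple OTC",
--     "ASPIRIN": "Simple OTC",
--     "NAPROXEN": "Simple OTC",
-- }
--
--
-- def _leading_token(n: str) -> str:
--     """Prefix of n up to (not including) the first literal space or comma."""
--     out = []
--     for ch in n:
--         if ch == ' ' or ch == ',':
--             break
--         out.append(ch)
--     return ''.join(out)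
--
--
-- def drug_category(drug_name: str) -> str:
--     """Map openFDA-style drug_name to one of three paper categories or Uncategorized."""
--     n = drug_name.strip().upper()
--     if not n:
--         return "Uncategorized"
--     return DRUG_CATEGORY.get(_leading_token(n), "Uncategorized")
-- ===== Notes on version B (the rewrite author's own statement) =====
-- stated objective: simpler
-- what changed: Replaces the three priority-ordered lists of keys each scanned with three prefix tests per key by one precomputed key->category dict: the name's leading token (prefix up to the first space/comma) is cut once and looked up; the lists are disjoint so no priority logic is needed.
import Mathlib
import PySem

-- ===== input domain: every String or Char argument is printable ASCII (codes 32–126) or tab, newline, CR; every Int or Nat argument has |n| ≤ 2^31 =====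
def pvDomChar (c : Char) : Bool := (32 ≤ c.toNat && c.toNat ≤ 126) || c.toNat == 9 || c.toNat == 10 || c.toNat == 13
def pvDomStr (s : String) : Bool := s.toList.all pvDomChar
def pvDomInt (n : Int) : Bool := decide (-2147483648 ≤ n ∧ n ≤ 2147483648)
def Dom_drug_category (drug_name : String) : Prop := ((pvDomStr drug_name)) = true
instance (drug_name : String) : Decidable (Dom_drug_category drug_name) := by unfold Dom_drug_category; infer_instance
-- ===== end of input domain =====

-- B replaces A's three priority-ordered key lists (three prefix tests per key each) by one
-- precomputed key->category dictionary looked up at the name's leading token (prefix up to the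
-- first literal space/comma); objective: simpler.


-- ===== PORT A =====
def pvSimpleOtc0 : List (List Char) :=
  ["IBUPROFEN".toList, "ACETAMINOPHEN".toList, "DIPHENHYDRAMINE".toList, "LORATADINE".toList,
   "OMEPRAZOLE".toList, "CETIRIZINE".toList, "ASPIRIN".toList, "NAPROXEN".toList]

def pvCommonRx0 : List (List Char) :=
  ["AMOXICILLIN".toList, "METFORMIN".toList, "LISINOPRIL".toList, "ATORVASTATIN".toList,
   "METOPROLOL".toList, "SERTRALINE".toList, "PREDNISONE".toList, "AZITHROMYCIN".toList]

def pvHighRisk0 : List (List Char) :=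
  ["METHOTREXATE".toList, "TOFACITINIB".toList, "WARFARIN".toList, "ISOTRETINOIN".toList,
   "CLOZAPINE".toList, "OXYCODONE".toList, "ALPRAZOLAM".toList, "AMPHETAMINE".toList,
   "DIAZEPAM".toList]

def SIMPLE_OTC_KEYS : List (List Char) := PySem.List.sorted pvSimpleOtc0 (fun k => k.length) true
def COMMON_RX_KEYS : List (List Char) := PySem.List.sorted pvCommonRx0 (fun k => k.length) true
def HIGH_RISK_KEYS : List (List Char) := PySem.List.sorted pvHighRisk0 (fun k => k.length) true

-- the inner helper `matches`: true iff n equals some key or starts with "<key> " / "<key>,"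
def pvMatches (n : List Char) (keys : List (List Char)) : Bool :=
  keys.any (fun k =>
    n == k || PySem.Chars.startswith n (k ++ [' ']) || PySem.Chars.startswith n (k ++ [',']))

def drug_category (drug_name : String) : String :=
  let n := PySem.Chars.upper (PySem.Chars.strip ((if drug_name == "" then "" else drug_name).toList))
  if n == [] then "Uncategorized"
  else if pvMatches n HIGH_RISK_KEYS then "High-Risk/Controlled"
  else if pvMatches n COMMON_RX_KEYS then "Common Rx"
  else if pvMatches n SIMPLE_OTC_KEYS then "Simple OTC"
  else "Uncategorized"

-- ===== PORT B =====
-- the literal dict DRUG_CATEGORY of Source B (all 25 keys distinct, in insertion order)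
def pvDrugDict : PySem.Dict (List Char) String := PySem.Dict.mk
  [("METHOTREXATE".toList, "High-Risk/Controlled"),
   ("TOFACITINIB".toList, "High-Risk/Controlled"),
   ("WARFARIN".toList, "High-Risk/Controlled"),
   ("ISOTRETINOIN".toList, "High-Risk/Controlled"),
   ("CLOZAPINE".toList, "High-Risk/Controlled"),
   ("OXYCODONE".toList, "High-Risk/Controlled"),
   ("ALPRAZOLAM".toList, "High-Risk/Controlled"),
   ("AMPHETAMINE".toList, "High-Risk/Controlled"),
   ("DIAZEPAM".toList, "High-Risk/Controlled"),
   ("AMOXICILLIN".toList, "Common Rx"),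
   ("METFORMIN".toList, "Common Rx"),
   ("LISINOPRIL".toList, "Common Rx"),
   ("ATORVASTATIN".toList, "Common Rx"),
   ("METOPROLOL".toList, "Common Rx"),
   ("SERTRALINE".toList, "Common Rx"),
   ("PREDNISONE".toList, "Common Rx"),
   ("AZITHROMYCIN".toList, "Common Rx"),
   ("IBUPROFEN".toList, "Simple OTC"),
   ("ACETAMINOPHEN".toList, "Simple OTC"),
   ("DIPHENHYDRAMINE".toList, "Simple OTC"),
   ("LORATADINE".toList, "Simple OTC"),
   ("OMEPRAZOLE".toList, "Simple OTC"),
   ("CETIRIZINE".toList, "Simple OTC"),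
   ("ASPIRIN".toList, "Simple OTC"),
   ("NAPROXEN".toList, "Simple OTC")]

-- `_leading_token`: the scan-until-space-or-comma loop = takeWhile on the characters
def pvLeadingToken (n : List Char) : List Char :=
  n.takeWhile (fun c => !(c == ' ' || c == ','))

def drug_category_alt (drug_name : String) : String :=
  let n := PySem.Chars.upper (PySem.Chars.strip drug_name.toList)
  if n == [] then "Uncategorized"
  else pvDrugDict.getD (pvLeadingToken n) "Uncategorized"

-- ===== PRECONDITION & SPEC =====
def Spec_drug_category (drug_name : String) (out : String) : Prop := out = drug_category_alt drug_name
instance (drug_name : String) (out : String) : Decidable (Spec_drug_category drug_name out) := by unfold Spec_drug_category; infer_instance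

-- ===== CLAIM (what is proved, stated in full; the proofs are below) =====
def Claim_equal_drug_category : Prop := ∀ (drug_name : String), Dom_drug_category drug_name → Spec_drug_category drug_name (drug_category drug_name)

-- ===== LEMMAS AND PROOFS =====

-- For a key containing no space/comma, A's triple test (equality / "<key> " prefix / "<key>," prefix)
-- is exactly "the leading token equals the key".
lemma pv_token_match (k : List Char) (hk : k.all (fun c => !(c == ' ' || c == ',')) = true)
    (n : List Char) :
    (n == k || PySem.Chars.startswith n (k ++ [' ']) || PySem.Chars.startswith n (k ++ [','])) =
      (n.takeWhile (fun c => !(c == ' ' || c == ',')) == k) := by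
  rw [Bool.eq_iff_iff]
  simp only [Bool.or_eq_true, beq_iff_eq, PySem.Chars.startswith_iff]
  induction k generalizing n with
  | nil =>
    cases n with
    | nil => simp
    | cons c n' =>
      by_cases h1 : c = ' '
      · subst h1; simp [List.cons_prefix_cons]
      · by_cases h2 : c = ','
        · subst h2; simp [List.cons_prefix_cons]
        · simp [List.cons_prefix_cons, h1, h2, Ne.symm h1, Ne.symm h2]
  | cons a k' ih =>
    simp only [List.all_cons, Bool.and_eq_true] at hk
    obtain ⟨ha, hk'⟩ := hk
    cases n with
    | nil => simp
    | cons c n' =>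
      by_cases hca : c = a
      · subst hca
        simp only [List.cons_append, List.takeWhile_cons, ha, if_true, List.cons_prefix_cons,
          List.cons.injEq, true_and]
        exact ih hk' n'
      · by_cases hpc : (!(c == ' ' || c == ',')) = true
        · simp only [Bool.not_eq_eq_eq_not, Bool.not_true, Bool.or_eq_false_iff, beq_eq_false_iff_ne,
            ne_eq] at hpc
          simp [List.cons_prefix_cons, hpc.1, hpc.2, hca, Ne.symm hca]
        · have h2 : c = ' ' ∨ c = ',' := by
            by_contra hno
            push Not at hno
            exact hpc (by simp [hno.1, hno.2])
          rcases h2 with h1 | h1 <;> subst h1 <;>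
            simp [List.takeWhile_cons, List.cons_prefix_cons, hca, Ne.symm hca]

lemma pv_matches_eq (keys : List (List Char))
    (hk : keys.all (fun k => k.all (fun c => !(c == ' ' || c == ','))) = true) (n : List Char) :
    pvMatches n keys = keys.any (fun k => n.takeWhile (fun c => !(c == ' ' || c == ',')) == k) := by
  unfold pvMatches
  induction keys with
  | nil => rfl
  | cons k ks ih =>
    simp only [List.all_cons, Bool.and_eq_true] at hk
    simp only [List.any_cons, pv_token_match k hk.1 n, ih hk.2]

lemma pv_getD_cons (k1 : List Char) (v1 : String) (rest : List (List Char × String))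
    (t : List Char) (d : String) :
    PySem.Dict.getD ⟨(k1, v1) :: rest⟩ t d
      = if (k1 == t) then v1 else PySem.Dict.getD ⟨rest⟩ t d := by
  by_cases h : (k1 == t) <;> simp [PySem.Dict.getD, PySem.Dict.get?, h]

lemma pv_getD_section (keys : List (List Char)) (v : String) (rest : List (List Char × String))
    (t : List Char) (d : String) :
    PySem.Dict.getD ⟨keys.map (fun k => (k, v)) ++ rest⟩ t d
      = if keys.any (fun k => t == k) then v else PySem.Dict.getD ⟨rest⟩ t d := by
  induction keys with
  | nil => simp
  | cons k ks ih =>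
    simp only [List.map_cons, List.cons_append, pv_getD_cons, List.any_cons, ih, Bool.beq_comm]
    by_cases h : (t == k) <;> simp [h]

lemma pv_chain_eq (n : List Char) :
    (if pvMatches n HIGH_RISK_KEYS then "High-Risk/Controlled"
     else if pvMatches n COMMON_RX_KEYS then "Common Rx"
     else if pvMatches n SIMPLE_OTC_KEYS then "Simple OTC"
     else "Uncategorized")
      = pvDrugDict.getD (pvLeadingToken n) "Uncategorized" := by
  have hH : pvMatches n HIGH_RISK_KEYS = pvMatches n pvHighRisk0 :=
    List.Perm.any_eq (PySem.List.sorted_perm pvHighRisk0 (fun k => k.length) true)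
  have hC : pvMatches n COMMON_RX_KEYS = pvMatches n pvCommonRx0 :=
    List.Perm.any_eq (PySem.List.sorted_perm pvCommonRx0 (fun k => k.length) true)
  have hS : pvMatches n SIMPLE_OTC_KEYS = pvMatches n pvSimpleOtc0 :=
    List.Perm.any_eq (PySem.List.sorted_perm pvSimpleOtc0 (fun k => k.length) true)
  have hd : pvDrugDict = PySem.Dict.mk
      (pvHighRisk0.map (fun k => (k, "High-Risk/Controlled")) ++
       (pvCommonRx0.map (fun k => (k, "Common Rx")) ++
        (pvSimpleOtc0.map (fun k => (k, "Simple OTC")) ++ []))) := by decide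
  rw [hH, hC, hS, pv_matches_eq pvHighRisk0 (by decide) n,
    pv_matches_eq pvCommonRx0 (by decide) n, pv_matches_eq pvSimpleOtc0 (by decide) n,
    hd, pv_getD_section, pv_getD_section, pv_getD_section]
  simp only [pvLeadingToken, Bool.beq_comm]
  simp [PySem.Dict.getD, PySem.Dict.get?]

-- ===== VERDICT (by name: the statement is the Claim_ definition above) =====
theorem drug_category_spec : Claim_equal_drug_category := by
  intro s _hd
  unfold Spec_drug_category drug_category drug_category_alt
  have hor : (if s == "" then "" else s).toList = s.toList := by
    by_cases h : s == "" <;> simp_all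
  rw [hor]
  set n := PySem.Chars.upper (PySem.Chars.strip s.toList) with hn
  by_cases h : n == []
  · simp [h]
  · simp only [if_neg h]
    exact pv_chain_eq n
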